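-- pv_equiv track=rewrite | github.com/IsakGairatov/Web-dev | Lab7/Task1/CodeBat/List-2/5.py | sum67
-- ===== SOURCE A (Python) =====
-- def sum67(nums):
--     ignore = False
--     total = 0
--     for num in nums:
--         if num == 6:
--             ignore = True
--         elif ignore and num == 7:
--             ignore = False
--         elif not ignore:
--             total += num
--     return total
-- ===== SOURCE B (Python) =====
-- def sum67(nums):
--     it = iter(nums)
--     total = 0
--     for num in it:
--         if num == 6:
--             for inner in it:
--                 if inner == 7:
--                     break
--         else:
--             total += num
--     return total
-- ===== Notes on version B (the rewrite author's own statement) =====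
-- stated objective: alternative
-- what changed: Replaces the flag-based state machine with a nested-iterator decomposition: an inner loop consumes the 6..7 span from the shared iterator, so no ignore flag is maintained.
import Mathlib
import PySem

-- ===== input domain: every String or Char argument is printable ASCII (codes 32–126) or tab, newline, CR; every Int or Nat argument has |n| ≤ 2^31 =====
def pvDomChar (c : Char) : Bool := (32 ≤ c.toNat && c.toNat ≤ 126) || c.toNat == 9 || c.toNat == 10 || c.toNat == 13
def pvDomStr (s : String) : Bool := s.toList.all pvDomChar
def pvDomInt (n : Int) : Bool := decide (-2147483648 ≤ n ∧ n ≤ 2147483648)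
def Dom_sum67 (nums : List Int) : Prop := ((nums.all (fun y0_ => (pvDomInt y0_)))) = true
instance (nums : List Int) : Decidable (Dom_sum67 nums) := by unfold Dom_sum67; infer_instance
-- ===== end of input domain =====

-- B replaces A's ignore-flag state machine with a nested-iterator decomposition (same result, same cost).

-- ===== PORT A =====
-- A: one fold carrying the (ignore, total) state; sum67Step is A's loop body, branches in A's order.
def sum67Step : (Bool × Int) → Int → (Bool × Int) :=
  fun (s : Bool × Int) num =>
    if num == 6 then (true, s.2)
    else if s.1 && num == 7 then (false, s.2)
    else if !s.1 then (s.1, s.2 + num)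
    else s

def sum67 (nums : List Int) : Int :=
  (nums.foldl sum67Step (false, 0)).2

-- ===== PORT B =====
-- B: the outer loop over the shared iterator (sum67Go) and the inner span-consuming loop (sum67Skip).
mutual
def sum67Go : List Int → Int
  | [] => 0
  | num :: rest => if num == 6 then sum67Skip rest else num + sum67Go rest
def sum67Skip : List Int → Int
  | [] => 0
  | inner :: rest => if inner == 7 then sum67Go rest else sum67Skip rest
end

def sum67_alt (nums : List Int) : Int := sum67Go nums

-- ===== PRECONDITION & SPEC =====
def Spec_sum67 (nums : List Int) (out : Int) : Prop := out = sum67_alt nums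
instance (nums : List Int) (out : Int) : Decidable (Spec_sum67 nums out) := by unfold Spec_sum67; infer_instance

-- ===== CLAIM (what is proved, stated in full; the proofs are below) =====
def Claim_equal_sum67 : Prop := ∀ (nums : List Int), Dom_sum67 nums → Spec_sum67 nums (sum67 nums)

-- ===== LEMMAS AND PROOFS =====
-- Invariant: A's fold from state (b, t) yields t plus B's skip/sum of the rest.
theorem sum67_fold_inv (l : List Int) : ∀ (b : Bool) (t : Int),
    (l.foldl sum67Step (b, t)).2 = t + (if b then sum67Skip l else sum67Go l) := by
  induction l with
  | nil => intro b t; cases b <;> simp [sum67Skip, sum67Go]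
  | cons n rest ih =>
    intro b t
    cases b <;> by_cases h6 : n = 6 <;> by_cases h7 : n = 7 <;>
      simp only [List.foldl_cons, sum67Step, h6, h7, sum67Skip, sum67Go, beq_self_eq_true] <;>
      simp [h6, h7, ih] <;> omega

-- ===== VERDICT (by name: the statement is the Claim_ definition above) =====
theorem sum67_spec : Claim_equal_sum67 := by
  intro nums _
  unfold Spec_sum67 sum67 sum67_alt
  simpa using sum67_fold_inv nums false 0
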